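-- pv_equiv track=rewrite | github.com/ShyWind123/RoamTouring-python | href.py | getCityId
-- ===== SOURCE A (Python) =====
-- def getCityId(cityStr) :
--     l = 0
--     r = len(cityStr)
--     isGetL = False
--     for i in range(len(cityStr)):
--         if not isGetL and cityStr[i] >= '0' and cityStr[i] <= '9':
--             l = i
--             isGetL = True
--         if isGetL and cityStr[i] == '/':
--             r = i
--             break
--     return cityStr[l:r]
-- ===== SOURCE B (Python) =====
-- def getCityId(cityStr):
--     # One backwards pass: maintain for the suffix already seen its prefix up to
--     # the next slash (tws) and the answer for that suffix (res); the earliest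
--     # digit processed last wins.
--     res = None
--     tws = ''
--     for c in reversed(cityStr):
--         if '0' <= c <= '9':
--             res = c + tws
--         tws = '' if c == '/' else c + tws
--     return cityStr if res is None else res
-- ===== Notes on version B (the rewrite author's own statement) =====
-- stated objective: alternative
-- what changed: Replaced A's forward indexed scan with flags (l, r, isGetL, break) by a single right-to-left pass that maintains, for the suffix seen so far, its prefix up to the next slash and the answer for that suffix, so the earliest digit processed last wins and no indices or slicing are used.
import Mathlib
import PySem

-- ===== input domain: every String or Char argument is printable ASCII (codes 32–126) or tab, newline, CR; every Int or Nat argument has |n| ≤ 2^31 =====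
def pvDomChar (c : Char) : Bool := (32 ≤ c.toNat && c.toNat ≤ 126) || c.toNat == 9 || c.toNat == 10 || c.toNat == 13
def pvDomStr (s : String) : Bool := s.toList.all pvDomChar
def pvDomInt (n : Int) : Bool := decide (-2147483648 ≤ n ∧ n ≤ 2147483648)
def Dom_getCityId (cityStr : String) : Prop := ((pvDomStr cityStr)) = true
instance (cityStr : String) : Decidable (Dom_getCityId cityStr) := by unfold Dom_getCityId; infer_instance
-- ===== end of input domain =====

-- B replaces A's forward indexed scan (flags l/r/isGetL + break + slice) by a single
-- right-to-left pass carrying (answer-so-far, suffix-prefix-up-to-next-slash), no indices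
-- or slicing (objective: alternative).

-- ===== PORT A =====
-- the for-loop with break, state (l, r, isGetL); indices i run over range(len(cityStr))
def getCityIdLoop (cs : List Char) : List Nat → Nat → Nat → Bool → Nat × Nat
  | [], l, r, _ => (l, r)
  | i :: rest, l, r, g =>
    let c := cs.getD i ' '
    let l' := if !g && decide ('0' ≤ c) && decide (c ≤ '9') then i else l
    let g' := g || (decide ('0' ≤ c) && decide (c ≤ '9'))
    if g' && (c == '/') then (l', i)          -- r = i; break
    else getCityIdLoop cs rest l' r g'

def getCityId (cityStr : String) : String :=
  match getCityIdLoop cityStr.toList (List.range cityStr.toList.length) 0 cityStr.toList.length false with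
  -- cityStr[l:r]: here 0 ≤ l ≤ r ≤ len, so Python's slice is exactly drop/take
  | (l, r) => String.ofList ((cityStr.toList.drop l).take (r - l))

-- ===== PORT B =====
-- one step of Source B's loop body over (res, tws); reversed(cityStr) is foldl over the reversed list
def altStep (st : Option (List Char) × List Char) (c : Char) : Option (List Char) × List Char :=
  (if decide ('0' ≤ c) && decide (c ≤ '9') then some (c :: st.2) else st.1,
   if c == '/' then [] else c :: st.2)

def getCityId_alt (cityStr : String) : String :=
  match cityStr.toList.reverse.foldl altStep (none, []) with
  | (none, _) => cityStr
  | (some x, _) => String.ofList x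

-- ===== PRECONDITION & SPEC =====
def Spec_getCityId (cityStr : String) (out : String) : Prop := out = getCityId_alt cityStr
instance (cityStr : String) (out : String) : Decidable (Spec_getCityId cityStr out) := by unfold Spec_getCityId; infer_instance

-- ===== CLAIM (what is proved, stated in full; the proofs are below) =====
def Claim_equal_getCityId : Prop := ∀ (cityStr : String), Dom_getCityId cityStr → Spec_getCityId cityStr (getCityId cityStr)

-- ===== LEMMAS AND PROOFS =====

lemma get?_of_drop_cons (cs t : List Char) (c : Char) (p : Nat) (h : cs.drop p = c :: t) :
    cs[p]? = some c := by
  have h0 : (cs.drop p)[0]? = some c := by rw [h]; rfl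
  simpa [List.getElem?_drop] using h0

lemma tail_of_drop_cons (cs t : List Char) (c : Char) (p : Nat) (h : cs.drop p = c :: t) :
    cs.drop (p + 1) = t := by
  rw [← List.tail_drop, h]
  rfl

-- one step of A's loop, with the character at index p made explicit
lemma loop_cons (cs : List Char) (p : Nat) (rest : List Nat) (l r : Nat) (g : Bool) (c : Char)
    (hc : cs[p]? = some c) :
    getCityIdLoop cs (p :: rest) l r g =
      if (g || (decide ('0' ≤ c) && decide (c ≤ '9'))) && (c == '/') then
        (if !g && decide ('0' ≤ c) && decide (c ≤ '9') then p else l, p)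
      else getCityIdLoop cs rest
        (if !g && decide ('0' ≤ c) && decide (c ≤ '9') then p else l) r
        (g || (decide ('0' ≤ c) && decide (c ≤ '9'))) := by
  have hgd : List.getD cs p ' ' = c := by simp [List.getD, hc]
  conv_lhs => unfold getCityIdLoop
  rw [hgd]

-- phase 2: digit already found at l, scanning indices p.. for the first '/'
lemma loop2 (cs suf : List Char) (p l r : Nat) (h : cs.drop p = suf) :
    getCityIdLoop cs (List.range' p suf.length) l r true =
      match suf.findIdx? (fun c => c == '/') with
      | some k => (l, p + k)
      | none => (l, r) := by
  induction suf generalizing p with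
  | nil => simp [getCityIdLoop]
  | cons c t ih =>
    have hc := get?_of_drop_cons cs t c p h
    have ht := tail_of_drop_cons cs t c p h
    rw [List.length_cons, List.range'_succ, loop_cons cs p _ l r true c hc]
    by_cases hs : c = '/'
    · simp [hs, List.findIdx?_cons]
    · rw [if_neg (by simp [hs])]
      simp only [Bool.not_true, Bool.false_and, Bool.false_eq_true, if_false, Bool.true_or]
      rw [ih (p + 1) ht, List.findIdx?_cons]
      simp only [beq_iff_eq, hs, if_false]
      cases t.findIdx? (fun c => c == '/') with
      | none => rfl
      | some k => simp; omega

-- phase 1: no digit found yet, scanning indices p..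
lemma loop1 (cs suf : List Char) (p l0 r : Nat) (h : cs.drop p = suf) :
    getCityIdLoop cs (List.range' p suf.length) l0 r false =
      match suf.findIdx? (fun c => decide ('0' ≤ c) && decide (c ≤ '9')) with
      | none => (l0, r)
      | some d =>
        match (cs.drop (p + d + 1)).findIdx? (fun c => c == '/') with
        | some k => (p + d, p + d + 1 + k)
        | none => (p + d, r) := by
  induction suf generalizing p l0 with
  | nil => simp [getCityIdLoop]
  | cons c t ih =>
    have hc := get?_of_drop_cons cs t c p h
    have ht := tail_of_drop_cons cs t c p h
    rw [List.length_cons, List.range'_succ, loop_cons cs p _ l0 r false c hc]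
    by_cases hd : '0' ≤ c ∧ c ≤ '9'
    · -- c is a digit: set l := p, isGetL := true; c ≠ '/' so no break this step
      have hne : ¬ (c = '/') := by
        rintro rfl; exact absurd hd.1 (by decide)
      have hdig : (decide ('0' ≤ c) && decide (c ≤ '9')) = true := by simp [hd.1, hd.2]
      rw [if_neg (by simp [hne]), if_pos (by simp [hdig]), Bool.false_or, hdig]
      rw [loop2 cs t (p + 1) p r ht, List.findIdx?_cons]
      rw [if_pos (by simpa using hdig)]
      dsimp only
      rw [Nat.add_zero, ht]
      cases t.findIdx? (fun c => c == '/') with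
      | none => rfl
      | some k => rfl
    · -- c is not a digit: state unchanged, no break (isGetL still false)
      have hb : (decide ('0' ≤ c) && decide (c ≤ '9')) = false := by
        rcases Decidable.not_and_iff_not_or_not.mp hd with h' | h' <;> simp [h']
      rw [if_neg (by simp [hb]), if_neg (by simp [hb]), Bool.false_or, hb]
      rw [ih (p + 1) l0 ht, List.findIdx?_cons, hb]
      simp only [Bool.false_eq_true, if_false]
      cases t.findIdx? (fun c => decide ('0' ≤ c) && decide (c ≤ '9')) with
      | none => rfl
      | some d =>
        simp only [Option.map_some]
        have he : p + 1 + d = p + (d + 1) := by omega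
        rw [he]

lemma findIdx?_digit_drop (cs : List Char) (d : Nat)
    (h : cs.findIdx? (fun c => decide ('0' ≤ c) && decide (c ≤ '9')) = some d) :
    d < cs.length ∧ ∃ c t, cs.drop d = c :: t ∧ ('0' ≤ c ∧ c ≤ '9') := by
  obtain ⟨hlt, hget, -⟩ := List.findIdx?_eq_some_iff_getElem.mp h
  refine ⟨hlt, cs[d], cs.drop (d + 1), ?_, by simpa using hget⟩
  rw [List.drop_eq_getElem_cons hlt]

-- B-side canonical forms: optRes = value of res, takeWhile = value of tws after the pass
def optRes : List Char → Option (List Char)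
  | [] => none
  | c :: t =>
    if decide ('0' ≤ c) && decide (c ≤ '9') then some (c :: t.takeWhile (fun c => !(c == '/')))
    else optRes t

lemma fold_char (cs : List Char) :
    cs.reverse.foldl altStep (none, []) =
      (optRes cs, cs.takeWhile (fun c => !(c == '/'))) := by
  rw [List.foldl_reverse]
  induction cs with
  | nil => rfl
  | cons c t ih =>
    rw [List.foldr_cons, ih]
    by_cases hs : c = '/'
    · subst hs
      simp [altStep, optRes]
    · simp [altStep, optRes, hs]

lemma optRes_none (cs : List Char)
    (h : cs.findIdx? (fun c => decide ('0' ≤ c) && decide (c ≤ '9')) = none) :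
    optRes cs = none := by
  induction cs with
  | nil => rfl
  | cons c t ih =>
    rw [List.findIdx?_cons] at h
    by_cases hd : (decide ('0' ≤ c) && decide (c ≤ '9')) = true
    · rw [hd] at h; simp at h
    · rw [Bool.not_eq_true] at hd
      rw [hd] at h
      simp only [Bool.false_eq_true, if_false, Option.map_eq_none_iff] at h
      simp [optRes, hd, ih h]

lemma optRes_some (cs : List Char) (d : Nat) (c : Char) (t : List Char)
    (h : cs.findIdx? (fun c => decide ('0' ≤ c) && decide (c ≤ '9')) = some d)
    (hdrop : cs.drop d = c :: t) :
    optRes cs = some (c :: t.takeWhile (fun c => !(c == '/'))) := by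
  induction cs generalizing d with
  | nil => simp at h
  | cons c0 t0 ih =>
    rw [List.findIdx?_cons] at h
    by_cases hd : (decide ('0' ≤ c0) && decide (c0 ≤ '9')) = true
    · rw [hd] at h
      simp only [if_true, Option.some.injEq] at h
      subst h
      simp only [List.drop_zero, List.cons.injEq] at hdrop
      obtain ⟨rfl, rfl⟩ := hdrop
      simp [optRes, hd]
    · rw [Bool.not_eq_true] at hd
      rw [hd] at h
      simp only [Bool.false_eq_true, if_false] at h
      cases hfi : t0.findIdx? (fun c => decide ('0' ≤ c) && decide (c ≤ '9')) with
      | none => rw [hfi] at h; simp at h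
      | some d' =>
        rw [hfi] at h
        simp only [Option.map_some, Option.some.injEq] at h
        subst h
        simp only [optRes, hd, Bool.false_eq_true, if_false]
        exact ih d' hfi (by simpa using hdrop)

-- findIdx? '/' vs takeWhile (≠ '/')
lemma takeWhile_eq_take_of_findIdx (t : List Char) (k : Nat)
    (h : t.findIdx? (fun c => c == '/') = some k) :
    t.takeWhile (fun c => !(c == '/')) = t.take k := by
  induction t generalizing k with
  | nil => simp at h
  | cons c t ih =>
    rw [List.findIdx?_cons] at h
    by_cases hs : c = '/'
    · rw [if_pos (by simp [hs])] at h
      simp only [Option.some.injEq] at h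
      subst h
      simp [hs]
    · rw [if_neg (by simp [hs])] at h
      cases hfi : t.findIdx? (fun c => c == '/') with
      | none => rw [hfi] at h; simp at h
      | some k' =>
        rw [hfi] at h
        simp only [Option.map_some, Option.some.injEq] at h
        subst h
        simp [hs, ih k' hfi]

lemma takeWhile_eq_self_of_findIdx_none (t : List Char)
    (h : t.findIdx? (fun c => c == '/') = none) :
    t.takeWhile (fun c => !(c == '/')) = t := by
  rw [List.takeWhile_eq_self_iff]
  intro x hx
  have := List.findIdx?_eq_none_iff.mp h x hx
  simpa using this

theorem getCityId_eq (s : String) : getCityId s = getCityId_alt s := by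
  unfold getCityId getCityId_alt
  rw [fold_char s.toList]
  have hrange : List.range s.toList.length = List.range' 0 (s.toList.drop 0).length := by
    simp [List.range_eq_range']
  rw [hrange, loop1 s.toList (s.toList.drop 0) 0 0 s.toList.length rfl]
  simp only [List.drop_zero, Nat.zero_add]
  cases hfd : s.toList.findIdx? (fun c => decide ('0' ≤ c) && decide (c ≤ '9')) with
  | none =>
    rw [optRes_none s.toList hfd]
    simp [List.take_of_length_le, String.ofList_toList]
  | some d =>
    obtain ⟨hlt, c, t, hdrop, hdig⟩ := findIdx?_digit_drop s.toList d hfd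
    have ht := tail_of_drop_cons s.toList t c d hdrop
    have hlen : s.toList.length = d + 1 + t.length := by
      have h1 := congrArg List.length hdrop
      rw [List.length_drop, List.length_cons] at h1
      omega
    rw [optRes_some s.toList d c t hfd hdrop]
    dsimp only
    rw [ht]
    cases hk : t.findIdx? (fun c => c == '/') with
    | none =>
      rw [show s.toList.length - d = (c :: t).length from by
          simp only [List.length_cons]; omega,
        hdrop, List.take_length, takeWhile_eq_self_of_findIdx_none t hk]
    | some k =>
      rw [show d + 1 + k - d = k + 1 from by omega, hdrop,
        takeWhile_eq_take_of_findIdx t k hk]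
      rfl

-- ===== VERDICT (by name: the statement is the Claim_ definition above) =====
theorem getCityId_spec : Claim_equal_getCityId := by
  intro s _
  unfold Spec_getCityId
  exact getCityId_eq s
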